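-- pv_equiv track=rewrite | github.com/SKam23/UCB-CS61A | Testing/cs61a-summer-2020-midterm/q4/q4.py | republic
-- ===== SOURCE A (Python) =====
-- def republic(speech, coffee):
--     """
--     Write a function `republic` that takes in two lists.
--         `speech` is a list of strings
--         `coffee` is a list of integers
--
--     It returns a new list where every element from `speech` is copied the
--     number of times as the corresponding element in `coffee`. If the number
--     of times to be copied is negative (-k), then it removes the previous
--     k elements added.
--
--     Note 1: `speech` and `coffee` do not have to be the same length, simply ignore
--     any extra elements in the longer list.
--
--     Note 2: you can assume that you will never be asked to delete more
--     elements than exist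
--
--
--     >>> republic(['a', 'b', 'c'], [1, 2, 3])
--     ['a', 'b', 'b', 'c', 'c', 'c']
--     >>> republic(['a', 'b', 'c'], [3])
--     ['a', 'a', 'a']
--     >>> republic(['a', 'b', 'c'], [0, 2, 0])
--     ['b', 'b']
--     >>> republic([], [1,2,3])
--     []
--     >>> republic(['a', 'b', 'c'], [1, -1, 3])
--     ['c', 'c', 'c']
--     """
--     def republic_helper(speech, coffee, updated_list):
--         if len(speech)==0 or len(coffee)==0:
--             return updated_list
--         if coffee[0]>=0:
--             updated_list.extend([speech[0] for _ in range(0, coffee[0])])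
--         else:
--             updated_list = updated_list[:coffee[0]]
--         return republic_helper(speech[1:], coffee[1:], updated_list)
--     return republic_helper(speech,coffee, [] )
-- ===== SOURCE B (Python) =====
-- def republic(speech, coffee):
--     result = []
--     for word, c in zip(speech, coffee):
--         if c >= 0:
--             result.extend([word] * c)
--         else:
--             del result[c:]
--     return result
-- ===== Notes on version B (the rewrite author's own statement) =====
-- stated objective: faster
-- what changed: Replaces the O(n^2) recursion that slices both input lists at every step with a single iterative pass over zip(speech, coffee) that appends to / truncates one result list in place.
import Mathlib
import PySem

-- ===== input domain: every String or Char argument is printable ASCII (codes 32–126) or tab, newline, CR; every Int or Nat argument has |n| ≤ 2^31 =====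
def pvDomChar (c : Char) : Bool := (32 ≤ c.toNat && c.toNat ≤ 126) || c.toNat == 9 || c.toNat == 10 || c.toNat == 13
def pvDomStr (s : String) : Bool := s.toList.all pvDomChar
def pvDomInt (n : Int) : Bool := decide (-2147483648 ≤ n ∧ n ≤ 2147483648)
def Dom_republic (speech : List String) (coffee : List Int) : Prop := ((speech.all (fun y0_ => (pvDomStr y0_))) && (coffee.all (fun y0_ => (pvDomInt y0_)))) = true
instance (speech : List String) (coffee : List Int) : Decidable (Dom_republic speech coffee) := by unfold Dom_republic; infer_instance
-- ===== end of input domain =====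

-- B replaces A's recursion (which slices both lists each call) by one iterative pass over
-- zip(speech, coffee) that appends to / truncates a single result list: faster (asymptotic).

-- ===== PORT A =====
def republicHelper (speech : List String) (coffee : List Int) (updated : List String) : List String :=
  match speech, coffee with
  | s :: ss, c :: cs =>
    if c ≥ 0 then
      republicHelper ss cs (updated ++ (PySem.List.pyRange 0 c 1).map (fun _ => s))
    else
      republicHelper ss cs (PySem.List.slice updated none (some c))
  | _, _ => updated

def republic (speech : List String) (coffee : List Int) : List String :=
  republicHelper speech coffee []

-- ===== PORT B =====
def republic_alt (speech : List String) (coffee : List Int) : List String :=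
  (speech.zip coffee).foldl
    (fun result p =>
      if p.2 ≥ 0 then result ++ List.replicate p.2.toNat p.1
      else result.take ((result.length : Int) + p.2).toNat) []

-- ===== PRECONDITION & SPEC =====
def Spec_republic (speech : List String) (coffee : List Int) (out : List String) : Prop := out = republic_alt speech coffee
instance (speech : List String) (coffee : List Int) (out : List String) : Decidable (Spec_republic speech coffee out) := by unfold Spec_republic; infer_instance

-- ===== CLAIM (what is proved, stated in full; the proofs are below) =====
def Claim_equal_republic : Prop := ∀ (speech : List String) (coffee : List Int), Dom_republic speech coffee → Spec_republic speech coffee (republic speech coffee)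

-- ===== LEMMAS AND PROOFS =====

-- A's extend step builds the same list as B's replicate.
theorem pv_extend_step (s : String) (c : Int) :
    (PySem.List.pyRange 0 c 1).map (fun _ => s) = List.replicate c.toNat s := by
  rw [PySem.List.pyRange_one]
  simp [Function.comp_def, List.map_const']

-- A's slice updated[:c] (c < 0) equals B's take (len + c).
theorem pv_trunc_step (u : List String) (c : Int) (hc : c < 0) :
    PySem.List.slice u none (some c) = u.take ((u.length : Int) + c).toNat := by
  obtain ⟨k, hk, rfl⟩ : ∃ k : Nat, 0 < k ∧ c = -(k : Int) :=
    ⟨(-c).toNat, by omega, by omega⟩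
  rw [PySem.List.slice_to_neg_natCast u k hk]
  congr 1
  omega

-- The recursive helper is the fold over the zipped lists.
theorem pv_helper_eq (speech : List String) :
    ∀ (coffee : List Int) (u : List String),
      republicHelper speech coffee u =
        (speech.zip coffee).foldl
          (fun result p =>
            if p.2 ≥ 0 then result ++ List.replicate p.2.toNat p.1
            else result.take ((result.length : Int) + p.2).toNat) u := by
  induction speech with
  | nil => intro coffee u; cases coffee <;> simp [republicHelper]
  | cons s ss ih =>
    intro coffee u
    cases coffee with
    | nil => simp [republicHelper]
    | cons c cs =>
      by_cases hc : c ≥ 0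
      · simp only [republicHelper, if_pos hc, List.zip_cons_cons, List.foldl_cons, ih,
          pv_extend_step]
      · simp only [republicHelper, if_neg hc, List.zip_cons_cons, List.foldl_cons, ih,
          pv_trunc_step u c (by omega)]

-- ===== VERDICT (by name: the statement is the Claim_ definition above) =====
theorem republic_spec : Claim_equal_republic := by
  intro speech coffee _
  unfold Spec_republic republic republic_alt
  exact pv_helper_eq speech coffee []
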